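-- pv_equiv track=rewrite | github.com/ayoubzulfiqar/Leetcode-Medium | FindtheDivisibilityArrayofaString/find_the_divisibility_array_of_a_string.py | divisibilityArray
-- ===== SOURCE A (Python) =====
-- def divisibilityArray(word: str, m: int) -> list[int]:
--     n = len(word)
--     div = [0] * n
--     current_remainder = 0
--
--     for i in range(n):
--         digit = int(word[i])
--         current_remainder = (current_remainder * 10 + digit) % m
--         if current_remainder == 0:
--             div[i] = 1
--         else:
--             div[i] = 0
--
--     return div
-- ===== SOURCE B (Python) =====
-- def divisibilityArray(word: str, m: int) -> list[int]:
--     return [1 if int(word[: i + 1]) % m == 0 else 0 for i in range(len(word))]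
-- ===== Notes on version B (the rewrite author's own statement) =====
-- stated objective: simpler
-- what changed: Replaces the running-remainder accumulator loop writing into a preallocated array with a stateless one-line comprehension that converts each whole prefix word[:i+1] to an int and tests divisibility directly.
import Mathlib
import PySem

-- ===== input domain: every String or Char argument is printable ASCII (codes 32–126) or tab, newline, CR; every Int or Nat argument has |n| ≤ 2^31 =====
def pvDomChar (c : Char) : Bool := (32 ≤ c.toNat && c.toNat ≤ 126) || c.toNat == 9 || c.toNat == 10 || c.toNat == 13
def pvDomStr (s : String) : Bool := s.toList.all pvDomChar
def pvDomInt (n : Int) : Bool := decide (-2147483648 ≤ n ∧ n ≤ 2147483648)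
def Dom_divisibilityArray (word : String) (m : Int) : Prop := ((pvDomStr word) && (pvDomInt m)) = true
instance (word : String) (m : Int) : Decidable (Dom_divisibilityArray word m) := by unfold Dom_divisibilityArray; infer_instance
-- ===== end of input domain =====

-- B replaces A's running-remainder accumulator loop with a stateless comprehension that
-- converts each whole prefix to an int and tests divisibility directly (objective: simpler).


-- ===== PORT A =====
-- int(word[i]) for a single character: hand-ported as the digit value c - '0'.
-- Exact on digit characters — Pre_ restricts to those; on any other character Python raises ValueError.
def pyDigit (c : Char) : Int := (c.toNat : Int) - 48

def divisibilityArray (word : String) (m : Int) : List Int :=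
  -- n = len(word); div = [0] * n; current_remainder = 0; for i in range(n): …
  ((PySem.List.pyRange 0 (word.toList.length : Int) 1).foldl
    (fun (st : List Int × Int) i =>
      let digit := pyDigit (PySem.List.pyGetD word.toList i ' ')           -- digit = int(word[i])
      let r := PySem.Int.mod (st.2 * 10 + digit) m                         -- (cur*10+digit) % m
      (PySem.List.pySetD st.1 i (if r == 0 then 1 else 0), r))             -- div[i] = 1 / 0
    (List.replicate word.toList.length (0 : Int), 0)).1

-- ===== PORT B =====
-- int(s) hand-ported as the decimal fold over the characters.
-- Exact on nonempty all-digit strings — every prefix taken under Pre_ is such; elsewhere Python raises ValueError.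
def decVal (cs : List Char) : Int := cs.foldl (fun a c => a * 10 + ((c.toNat : Int) - 48)) 0

def divisibilityArray_alt (word : String) (m : Int) : List Int :=
  (PySem.List.pyRange 0 (word.toList.length : Int) 1).map
    (fun i =>
      if PySem.Int.mod (decVal (PySem.List.slice word.toList (some 0) (some (i + 1)))) m == 0
      then 1 else 0)

-- ===== PRECONDITION & SPEC =====
-- Pre_ excludes exactly the inputs on which Python A raises: a non-digit character
-- (ValueError from int(word[i])) or m = 0 with a nonempty word (ZeroDivisionError).
def Pre_divisibilityArray (word : String) (m : Int) : Prop :=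
  word.toList.all (fun c => c.isDigit) = true ∧ (word.toList = [] ∨ m ≠ 0)
instance (word : String) (m : Int) : Decidable (Pre_divisibilityArray word m) := by
  unfold Pre_divisibilityArray; infer_instance

def pvWitness_divisibilityArray : String × Int := ("998244353", 3)

def Spec_divisibilityArray (word : String) (m : Int) (out : List Int) : Prop := out = divisibilityArray_alt word m
instance (word : String) (m : Int) (out : List Int) : Decidable (Spec_divisibilityArray word m out) := by unfold Spec_divisibilityArray; infer_instance

-- ===== CLAIM (what is proved, stated in full; the proofs are below) =====
def Claim_equal_divisibilityArray : Prop := ∀ (word : String) (m : Int), Dom_divisibilityArray word m → Pre_divisibilityArray word m → Spec_divisibilityArray word m (divisibilityArray word m)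

-- ===== LEMMAS AND PROOFS =====

-- The value written at position k by both programs.
def prefBit (cs : List Char) (m : Int) (k : Nat) : Int :=
  if PySem.Int.mod (decVal (cs.take (k + 1))) m == 0 then 1 else 0

-- Reducing a partial sum mod m before the next digit step does not change the remainder.
theorem fmod_step (a d m : Int) :
    Int.fmod (Int.fmod a m * 10 + d) m = Int.fmod (a * 10 + d) m := by
  rw [Int.add_fmod, Int.mul_fmod, Int.fmod_fmod_of_dvd _ (dvd_refl m),
    ← Int.mul_fmod, ← Int.add_fmod]

theorem decVal_append_singleton (cs : List Char) (c : Char) :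
    decVal (cs ++ [c]) = decVal cs * 10 + ((c.toNat : Int) - 48) := by
  simp [decVal, List.foldl_append]

-- Loop invariant for A's fold over range(k): the array holds prefBit on the first k
-- slots and still 0 after, and the carried remainder is decVal(prefix of length k) mod m.
theorem foldA_inv (cs : List Char) (m : Int) (k : Nat) (hk : k ≤ cs.length) :
    ((PySem.List.pyRange 0 (k : Int) 1).foldl
      (fun (st : List Int × Int) i =>
        let digit := pyDigit (PySem.List.pyGetD cs i ' ')
        let r := PySem.Int.mod (st.2 * 10 + digit) m
        (PySem.List.pySetD st.1 i (if r == 0 then 1 else 0), r))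
      (List.replicate cs.length (0 : Int), 0))
    = ((List.range k).map (prefBit cs m) ++ List.replicate (cs.length - k) 0,
       Int.fmod (decVal (cs.take k)) m) := by
  induction k with
  | zero => simp [PySem.List.pyRange_one_eq_nil, decVal, Int.fmod]
  | succ k ih =>
    have hk' : k ≤ cs.length := Nat.le_of_succ_le hk
    have hklt : k < cs.length := hk
    have hsplit : PySem.List.pyRange 0 ((k + 1 : Nat) : Int) 1
        = PySem.List.pyRange 0 (k : Int) 1 ++ [(k : Int)] := by
      have := PySem.List.pyRange_one_succ_right (a := 0) (b := (k : Int)) (by positivity)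
      rw [show ((k + 1 : Nat) : Int) = (k : Int) + 1 by push_cast; ring, this]
    rw [hsplit, List.foldl_append, ih hk']
    simp only [List.foldl_cons, List.foldl_nil]
    have hget : PySem.List.pyGetD cs (k : Int) ' ' = cs[k] := by
      rw [PySem.List.pyGetD_natCast]
      exact List.getD_eq_getElem cs ' ' hklt
    have htake : cs.take (k + 1) = cs.take k ++ [cs[k]] := by
      rw [List.take_add_one]
      simp [List.getElem?_eq_getElem hklt]
    have hrem : PySem.Int.mod (Int.fmod (decVal (cs.take k)) m * 10 + pyDigit cs[k]) m
        = Int.fmod (decVal (cs.take (k + 1))) m := by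
      rw [htake, decVal_append_singleton]
      exact fmod_step _ _ _
    have hset : PySem.List.pySetD
        ((List.range k).map (prefBit cs m) ++ List.replicate (cs.length - k) 0) (k : Int)
        (if Int.fmod (decVal (cs.take (k + 1))) m == 0 then 1 else 0)
        = (List.range (k + 1)).map (prefBit cs m) ++ List.replicate (cs.length - (k + 1)) 0 := by
      rw [PySem.List.pySetD_natCast]
      have hrep : List.replicate (cs.length - k) (0 : Int)
          = 0 :: List.replicate (cs.length - (k + 1)) 0 := by
        rw [show cs.length - k = (cs.length - (k + 1)) + 1 by omega]
        rfl
      rw [hrep, List.set_append_right _ _ (by simp)]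
      simp [List.range_succ, prefBit, PySem.Int.mod]
    simp only [hget, hrem]
    rw [hset]

-- A's result, characterised.
theorem divisibilityArray_eq (word : String) (m : Int) :
    divisibilityArray word m = (List.range word.toList.length).map (prefBit word.toList m) := by
  unfold divisibilityArray
  rw [foldA_inv word.toList m word.toList.length (le_refl _)]
  simp

-- B's result, characterised: the slice word[:i+1] at i = k is the prefix of length k+1.
theorem divisibilityArray_alt_eq (word : String) (m : Int) :
    divisibilityArray_alt word m = (List.range word.toList.length).map (prefBit word.toList m) := by
  unfold divisibilityArray_alt
  rw [PySem.List.pyRange_one]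
  simp only [sub_zero, Int.toNat_natCast, List.map_map]
  apply List.map_congr_left
  intro k _
  simp only [Function.comp_apply, zero_add]
  have hb : (0 : Int) ≤ (k : Int) + 1 := by positivity
  rw [PySem.List.slice_zero_start, PySem.List.slice_to _ hb]
  have : ((k : Int) + 1).toNat = k + 1 := by omega
  rw [this]
  rfl

-- ===== VERDICT (by name: the statement is the Claim_ definition above) =====
theorem divisibilityArray_spec : Claim_equal_divisibilityArray := by
  intro word m _ _
  unfold Spec_divisibilityArray
  rw [divisibilityArray_eq, divisibilityArray_alt_eq]
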